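-- pv_equiv track=rewrite | github.com/tarunyadav/DifferentialML | GIFT_COFB.py | rowperm
-- ===== SOURCE A (Python) =====
-- def rowperm(S, B0_pos, B1_pos, B2_pos, B3_pos):
--     T=0x00000000;
--     for b in range(0,8):
--         T |= ((S>>(4*b+0))&0x1)<<(b + 8*B0_pos);
--         T |= ((S>>(4*b+1))&0x1)<<(b + 8*B1_pos);
--         T |= ((S>>(4*b+2))&0x1)<<(b + 8*B2_pos);
--         T |= ((S>>(4*b+3))&0x1)<<(b + 8*B3_pos);
--     return(T);
-- ===== SOURCE B (Python) =====
-- def rowperm(S, B0_pos, B1_pos, B2_pos, B3_pos):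
--     # Bit-plane transpose: for each bit-slot j, extract the stride-4 plane of
--     # bit j across the 8 nibbles, compress it into one contiguous byte, and
--     # OR that byte into the output at byte position Bj_pos.
--     u = S % 0x100000000
--     T = 0
--     for j, pos in enumerate((B0_pos, B1_pos, B2_pos, B3_pos)):
--         p = (u >> j) & 0x11111111
--         p = (p | (p >> 3)) & 0x03030303
--         p = (p | (p >> 6)) & 0x000F000F
--         p = (p | (p >> 12)) & 0xFF
--         T |= p << (8 * pos)
--     return T
-- ===== Notes on version B (the rewrite author's own statement) =====
-- stated objective: alternative
-- what changed: Replaces the 8-iteration per-bit scatter loop (32 single-bit extract-and-place operations) by a bit-parallel plane transpose: for each bit-slot j it masks out the stride-4 bit plane (S>>j)&0x11111111, compresses it into one contiguous byte with a fixed three-step shift-and-mask sequence, and ORs the whole byte into place at 8*Bj_pos.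
import Mathlib
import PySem

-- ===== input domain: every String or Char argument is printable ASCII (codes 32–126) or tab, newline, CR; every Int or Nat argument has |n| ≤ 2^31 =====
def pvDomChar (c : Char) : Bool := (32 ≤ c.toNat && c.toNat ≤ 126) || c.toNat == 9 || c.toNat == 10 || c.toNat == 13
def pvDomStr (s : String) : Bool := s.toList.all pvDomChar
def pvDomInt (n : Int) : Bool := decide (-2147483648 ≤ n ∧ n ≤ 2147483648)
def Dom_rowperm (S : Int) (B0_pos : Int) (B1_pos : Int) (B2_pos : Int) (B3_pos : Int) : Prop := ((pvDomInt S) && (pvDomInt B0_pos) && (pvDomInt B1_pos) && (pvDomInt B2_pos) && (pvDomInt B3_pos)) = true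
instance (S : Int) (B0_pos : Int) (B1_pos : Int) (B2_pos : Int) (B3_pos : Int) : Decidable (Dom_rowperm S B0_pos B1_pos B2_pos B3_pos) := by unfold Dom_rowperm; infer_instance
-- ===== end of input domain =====

-- B replaces A's per-bit scatter loop by a bit-plane transpose (mask a stride-4
-- plane, compress it to one byte, OR the byte into place) — objective: alternative.

-- ===== PORT A =====
def rowperm (S : Int) (B0_pos : Int) (B1_pos : Int) (B2_pos : Int) (B3_pos : Int) : Int :=
  (PySem.List.pyRange 0 8 1).foldl (fun (T b : Int) =>
    let T1 := PySem.Int.bor T  (PySem.Int.band (S >>> (4*b+0).toNat) 0x1 <<< (b + 8*B0_pos).toNat)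
    let T2 := PySem.Int.bor T1 (PySem.Int.band (S >>> (4*b+1).toNat) 0x1 <<< (b + 8*B1_pos).toNat)
    let T3 := PySem.Int.bor T2 (PySem.Int.band (S >>> (4*b+2).toNat) 0x1 <<< (b + 8*B2_pos).toNat)
    PySem.Int.bor T3 (PySem.Int.band (S >>> (4*b+3).toNat) 0x1 <<< (b + 8*B3_pos).toNat)) 0x00000000

-- ===== PORT B =====
def rowperm_alt (S : Int) (B0_pos : Int) (B1_pos : Int) (B2_pos : Int) (B3_pos : Int) : Int :=
  let u := PySem.Int.mod S 0x100000000
  List.foldl (fun (T : Int) (jp : Nat × Int) =>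
    let p0 := PySem.Int.band (u >>> jp.1) 0x11111111
    let p1 := PySem.Int.band (PySem.Int.bor p0 (p0 >>> (3:Nat))) 0x03030303
    let p2 := PySem.Int.band (PySem.Int.bor p1 (p1 >>> (6:Nat))) 0x000F000F
    let p3 := PySem.Int.band (PySem.Int.bor p2 (p2 >>> (12:Nat))) 0xFF
    PySem.Int.bor T (p3 <<< (8*jp.2).toNat)) 0
    [((0:Nat), B0_pos), (1, B1_pos), (2, B2_pos), (3, B3_pos)]

-- ===== PRECONDITION & SPEC =====
-- Pre_ excludes exactly the inputs where Python A raises (a negative byte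
-- position makes some shift amount b + 8*Bj_pos negative → ValueError).
def Pre_rowperm (S : Int) (B0_pos : Int) (B1_pos : Int) (B2_pos : Int) (B3_pos : Int) : Prop :=
  0 ≤ B0_pos ∧ 0 ≤ B1_pos ∧ 0 ≤ B2_pos ∧ 0 ≤ B3_pos
instance (S : Int) (B0_pos : Int) (B1_pos : Int) (B2_pos : Int) (B3_pos : Int) : Decidable (Pre_rowperm S B0_pos B1_pos B2_pos B3_pos) := by unfold Pre_rowperm; infer_instance
def pvWitness_rowperm : Int × Int × Int × Int × Int := (305419896, 0, 1, 2, 3)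

def Spec_rowperm (S : Int) (B0_pos : Int) (B1_pos : Int) (B2_pos : Int) (B3_pos : Int) (out : Int) : Prop := out = rowperm_alt S B0_pos B1_pos B2_pos B3_pos
instance (S : Int) (B0_pos : Int) (B1_pos : Int) (B2_pos : Int) (B3_pos : Int) (out : Int) : Decidable (Spec_rowperm S B0_pos B1_pos B2_pos B3_pos out) := by unfold Spec_rowperm; infer_instance

-- ===== CLAIM (what is proved, stated in full; the proofs are below) =====
def Claim_equal_rowperm : Prop := ∀ (S : Int) (B0_pos : Int) (B1_pos : Int) (B2_pos : Int) (B3_pos : Int), Dom_rowperm S B0_pos B1_pos B2_pos B3_pos → Pre_rowperm S B0_pos B1_pos B2_pos B3_pos → Spec_rowperm S B0_pos B1_pos B2_pos B3_pos (rowperm S B0_pos B1_pos B2_pos B3_pos)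

-- ===== LEMMAS AND PROOFS =====

-- testBit of the four mask constants, at every index
lemma pv_tb_mask (i : Nat) : Nat.testBit 0x11111111 i = (decide (i < 32) && decide (i % 4 = 0)) := by
  by_cases h : i < 32
  · interval_cases i <;> decide
  · have hlt : (0x11111111 : Nat) < 2 ^ i :=
      lt_of_lt_of_le (show (0x11111111:Nat) < 2^32 by norm_num) (Nat.pow_le_pow_right (by norm_num) (by omega))
    simp [Nat.testBit_lt_two_pow hlt, h]

lemma pv_tb_m2 (i : Nat) : Nat.testBit 0x03030303 i = (decide (i < 32) && decide (i % 8 < 2)) := by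
  by_cases h : i < 32
  · interval_cases i <;> decide
  · have hlt : (0x03030303 : Nat) < 2 ^ i :=
      lt_of_lt_of_le (show (0x03030303:Nat) < 2^32 by norm_num) (Nat.pow_le_pow_right (by norm_num) (by omega))
    simp [Nat.testBit_lt_two_pow hlt, h]

lemma pv_tb_m3 (i : Nat) : Nat.testBit 0x000F000F i = (decide (i < 32) && decide (i % 16 < 4)) := by
  by_cases h : i < 32
  · interval_cases i <;> decide
  · have hlt : (0x000F000F : Nat) < 2 ^ i :=
      lt_of_lt_of_le (show (0x000F000F:Nat) < 2^32 by norm_num) (Nat.pow_le_pow_right (by norm_num) (by omega))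
    simp [Nat.testBit_lt_two_pow hlt, h]

lemma pv_tb_ff (i : Nat) : Nat.testBit 0xFF i = decide (i < 8) := by
  by_cases h : i < 8
  · interval_cases i <;> decide
  · have hlt : (0xFF : Nat) < 2 ^ i :=
      lt_of_lt_of_le (show (0xFF:Nat) < 2^8 by norm_num) (Nat.pow_le_pow_right (by norm_num) (by omega))
    simp [Nat.testBit_lt_two_pow hlt, h]

lemma pv_tb_one (i : Nat) : Nat.testBit 1 i = decide (i = 0) := by
  cases i with
  | zero => decide
  | succ n =>
    have hlt : (1 : Nat) < 2 ^ (n+1) := by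
      have := Nat.one_lt_two_pow_iff (n := n+1)
      omega
    simp [Nat.testBit_lt_two_pow hlt]

-- B's compress sequence characterised as the 8 scattered bits of the stride-4 plane
lemma pv_compress_plane (y : Nat) :
    ((((y &&& 0x11111111) ||| (y &&& 0x11111111) >>> 3) &&& 0x03030303 |||
        (((y &&& 0x11111111) ||| (y &&& 0x11111111) >>> 3) &&& 0x03030303) >>> 6) &&& 0x000F000F |||
       ((((y &&& 0x11111111) ||| (y &&& 0x11111111) >>> 3) &&& 0x03030303 |||
        (((y &&& 0x11111111) ||| (y &&& 0x11111111) >>> 3) &&& 0x03030303) >>> 6) &&& 0x000F000F) >>> 12) &&& 0xFF =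
      ((y >>> 0 &&& 1) <<< 0) ||| ((y >>> 4 &&& 1) <<< 1) ||| ((y >>> 8 &&& 1) <<< 2) |||
      ((y >>> 12 &&& 1) <<< 3) ||| ((y >>> 16 &&& 1) <<< 4) ||| ((y >>> 20 &&& 1) <<< 5) |||
      ((y >>> 24 &&& 1) <<< 6) ||| ((y >>> 28 &&& 1) <<< 7) := by
  apply Nat.eq_of_testBit_eq
  intro i
  simp only [Nat.testBit_or, Nat.testBit_and, Nat.testBit_shiftLeft,
    Nat.testBit_shiftRight, pv_tb_mask, pv_tb_m2, pv_tb_m3, pv_tb_ff, pv_tb_one]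
  by_cases h : i < 8
  · interval_cases i <;> simp
  · have h8 : decide (i < 8) = false := by simpa using h
    rw [h8, Bool.and_false]
    simp [Nat.sub_eq_zero_iff_le, show ¬ i ≤ 1 by omega, show ¬ i ≤ 2 by omega, show ¬ i ≤ 3 by omega, show ¬ i ≤ 4 by omega, show ¬ i ≤ 5 by omega, show ¬ i ≤ 6 by omega, show ¬ i ≤ 7 by omega]
    exact fun _ => by omega



lemma pv_bor0 (a : Int) : PySem.Int.bor 0 a = a := by
  rw [PySem.Int.bor_comm, PySem.Int.bor_zero]

lemma pv_k0 (n : Nat) : ((0:Int) + 8*(n:Int)).toNat = 0 + 8*n := by omega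
lemma pv_k1 (n : Nat) : ((1:Int) + 8*(n:Int)).toNat = 1 + 8*n := by omega
lemma pv_k2 (n : Nat) : ((2:Int) + 8*(n:Int)).toNat = 2 + 8*n := by omega
lemma pv_k3 (n : Nat) : ((3:Int) + 8*(n:Int)).toNat = 3 + 8*n := by omega
lemma pv_k4 (n : Nat) : ((4:Int) + 8*(n:Int)).toNat = 4 + 8*n := by omega
lemma pv_k5 (n : Nat) : ((5:Int) + 8*(n:Int)).toNat = 5 + 8*n := by omega
lemma pv_k6 (n : Nat) : ((6:Int) + 8*(n:Int)).toNat = 6 + 8*n := by omega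
lemma pv_k7 (n : Nat) : ((7:Int) + 8*(n:Int)).toNat = 7 + 8*n := by omega
lemma pv_k8 (n : Nat) : ((8:Int)*(n:Int)).toNat = 8*n := by omega

lemma pv_bm1 (x : Nat) : PySem.Int.band (x:Int) 0x11111111 = ((x &&& 0x11111111 : Nat) : Int) := by
  simpa using PySem.Int.band_natCast x 0x11111111
lemma pv_bm2 (x : Nat) : PySem.Int.band (x:Int) 0x03030303 = ((x &&& 0x03030303 : Nat) : Int) := by
  simpa using PySem.Int.band_natCast x 0x03030303
lemma pv_bm3 (x : Nat) : PySem.Int.band (x:Int) 0x000F000F = ((x &&& 0x000F000F : Nat) : Int) := by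
  simpa using PySem.Int.band_natCast x 0x000F000F
lemma pv_bm4 (x : Nat) : PySem.Int.band (x:Int) 0xFF = ((x &&& 0xFF : Nat) : Int) := by
  simpa using PySem.Int.band_natCast x 0xFF

-- A's per-bit term, over the low 32 bits of S
lemma pv_bandbit (S : Int) (u : Nat) (hu : S % 4294967296 = ↑u) (t : Nat) (ht : t < 32) :
    PySem.Int.band (S >>> t) 1 = ((u >>> t &&& 1 : Nat) : Int) := by
  rw [PySem.Int.band_one]
  have hm : PySem.Int.mod (S >>> t) 2 = (S >>> t) % 2 := by
    simp [PySem.Int.mod, Int.fmod_eq_emod]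
  rw [hm, Int.shiftRight_eq_div_pow, Nat.shiftRight_eq_div_pow, Nat.and_one_is_mod,
    show ((2^t : Nat) : Int) = (2:Int)^t from by push_cast; rfl]
  obtain ⟨q, hq⟩ : ∃ q : Int, S = 2 ^ 32 * q + ↑u := ⟨S / 2 ^ 32, by omega⟩
  subst hq
  have h32 : (2 : Int) ^ 32 * q + ↑u = ↑u + (2 ^ (32 - t) * q) * (2:Int) ^ t := by
    push_cast
    rw [mul_comm ((2:Int) ^ (32 - t) * q) (2 ^ t), ← mul_assoc, ← pow_add]
    rw [show t + (32 - t) = 32 by omega]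
    ring
  rw [h32, Int.add_mul_ediv_right _ _ (show ((2:Int) ^ t) ≠ 0 by positivity)]
  have hev : (2 : Int) ^ (32 - t) * q = 2 * (2 ^ (32 - t - 1) * q) := by
    rw [← mul_assoc, ← pow_succ']
    congr 2
    omega
  rw [hev, Int.add_mul_emod_self_left]
  push_cast
  rfl

-- ===== VERDICT (by name: the statement is the Claim_ definition above) =====
theorem rowperm_spec : Claim_equal_rowperm := by
  intro S B0 B1 B2 B3 hD hP
  obtain ⟨h0, h1, h2, h3⟩ := hP
  unfold Spec_rowperm
  lift B0 to ℕ using h0 with n0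
  lift B1 to ℕ using h1 with n1
  lift B2 to ℕ using h2 with n2
  lift B3 to ℕ using h3 with n3
  have hu : S % 4294967296 = ↑((S % 4294967296).toNat) := by omega
  set u : ℕ := (S % 4294967296).toNat with hudef
  have hrange : PySem.List.pyRange 0 8 1 = [0,1,2,3,4,5,6,7] := by decide
  rw [rowperm, rowperm_alt, hrange]
  simp only [List.foldl]
  have hmod : PySem.Int.mod S 0x100000000 = (u : Int) := by
    rw [show PySem.Int.mod S 0x100000000 = S % 4294967296 from by
      simp [PySem.Int.mod, Int.fmod_eq_emod], hu]
  simp only [Int.reduceMul, Int.reduceAdd, Int.reduceToNat, hmod,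
    pv_k0, pv_k1, pv_k2, pv_k3, pv_k4, pv_k5, pv_k6, pv_k7, pv_k8,
    pv_bandbit S u hu, Nat.reduceLT,
    ← Int.natCast_shiftRight, pv_bm1, pv_bm2, pv_bm3, pv_bm4,
    PySem.Int.bor_natCast, ← Int.natCast_shiftLeft, pv_bor0]
  rw [Nat.cast_inj, pv_compress_plane (u >>> 0), pv_compress_plane (u >>> 1),
    pv_compress_plane (u >>> 2), pv_compress_plane (u >>> 3)]
  simp only [Nat.shiftLeft_or_distrib, ← Nat.shiftRight_add, Nat.reduceAdd, Nat.shiftLeft_add]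
  ac_rfl
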